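-- pv_equiv track=rewrite | github.com/Olabisi-Balogun/Clustering-Validation | nmi.py | get_cluster_dict
-- ===== SOURCE A (Python) =====
-- def get_cluster_dict(label1, label2):
--     #label1.sort()
--     #label2.sort()
--     n_ground = len(set(label1))
--     n_pred = len(set(label2))
--     cluster_dict = {}
--     merged_label = tuple(zip(label2, label1))
--
--
--     for i in range(n_pred):
--         count_label=0
--         for j in range(n_ground):
--             if (str(i),str(j)) in(merged_label):
--                 count = merged_label.count((str(i),str(j)))
--                 count_label +=count
--
--         cluster_dict[str(i)] = count_label
--
--
--
--     return cluster_dict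
-- ===== SOURCE B (Python) =====
-- def get_cluster_dict(label1, label2):
--     n_ground = len(set(label1))
--     n_pred = len(set(label2))
--     valid_ground = set(str(j) for j in range(n_ground))
--     sums = {}
--     for a, b in zip(label2, label1):
--         if b in valid_ground:
--             sums[a] = sums.get(a, 0) + 1
--     return {str(i): sums.get(str(i), 0) for i in range(n_pred)}
-- ===== Notes on version B (the rewrite author's own statement) =====
-- stated objective: faster
-- what changed: Replaces A's n_pred*n_ground grid of full scans over the zipped labels by a single pass over the zipped pairs that accumulates per-predicted-label sums (counting only pairs whose ground label is a valid range string), then emits the result dict by direct lookup per predicted index.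
import Mathlib
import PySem

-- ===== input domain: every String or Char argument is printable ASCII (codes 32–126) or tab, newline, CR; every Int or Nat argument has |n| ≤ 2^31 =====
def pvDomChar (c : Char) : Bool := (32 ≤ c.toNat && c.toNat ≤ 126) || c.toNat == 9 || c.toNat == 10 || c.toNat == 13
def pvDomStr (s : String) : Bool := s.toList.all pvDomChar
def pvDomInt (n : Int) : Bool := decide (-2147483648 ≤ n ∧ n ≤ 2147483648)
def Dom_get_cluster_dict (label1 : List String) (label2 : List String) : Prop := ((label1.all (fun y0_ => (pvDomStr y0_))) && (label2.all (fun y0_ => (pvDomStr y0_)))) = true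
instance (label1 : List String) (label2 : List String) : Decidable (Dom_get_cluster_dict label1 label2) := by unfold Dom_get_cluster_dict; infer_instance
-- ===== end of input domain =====

-- B replaces A's per-(i,j) scans of the zipped labels (membership test + .count for every
-- grid cell) by ONE pass over the zipped pairs accumulating per-predicted-label sums, so it
-- is asymptotically faster; same return value.

-- ===== PORT A =====
def get_cluster_dict (label1 : List String) (label2 : List String) : List (String × Int) :=
  let n_ground : Int := PySem.Set.len (PySem.Set.ofList label1)
  let n_pred : Int := PySem.Set.len (PySem.Set.ofList label2)
  let merged_label : List (String × String) := label2.zip label1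
  ((PySem.List.pyRange 0 n_pred 1).foldl
    (fun cluster_dict i =>
      let count_label : Int :=
        (PySem.List.pyRange 0 n_ground 1).foldl
          (fun count_label j =>
            if (PySem.Int.toStr i, PySem.Int.toStr j) ∈ merged_label then
              count_label + (merged_label.count (PySem.Int.toStr i, PySem.Int.toStr j) : Int)
            else count_label) 0
      cluster_dict.insert (PySem.Int.toStr i) count_label)
    PySem.Dict.empty).items

-- ===== PORT B =====
def get_cluster_dict_alt (label1 : List String) (label2 : List String) : List (String × Int) :=
  let n_ground : Int := PySem.Set.len (PySem.Set.ofList label1)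
  let n_pred : Int := PySem.Set.len (PySem.Set.ofList label2)
  let valid_ground : PySem.Set String :=
    PySem.Set.ofList ((PySem.List.pyRange 0 n_ground 1).map PySem.Int.toStr)
  let sums : PySem.Dict String Int :=
    (label2.zip label1).foldl
      (fun sums p =>
        if valid_ground.contains p.2 then sums.insert p.1 (sums.getD p.1 0 + 1) else sums)
      PySem.Dict.empty
  ((PySem.List.pyRange 0 n_pred 1).foldl
    (fun d i => d.insert (PySem.Int.toStr i) (sums.getD (PySem.Int.toStr i) 0))
    PySem.Dict.empty).items

-- ===== PRECONDITION & SPEC =====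
def Spec_get_cluster_dict (label1 : List String) (label2 : List String) (out : List (String × Int)) : Prop := out = get_cluster_dict_alt label1 label2
instance (label1 : List String) (label2 : List String) (out : List (String × Int)) : Decidable (Spec_get_cluster_dict label1 label2 out) := by unfold Spec_get_cluster_dict; infer_instance

-- ===== CLAIM (what is proved, stated in full; the proofs are below) =====
def Claim_equal_get_cluster_dict : Prop := ∀ (label1 : List String) (label2 : List String), Dom_get_cluster_dict label1 label2 → Spec_get_cluster_dict label1 label2 (get_cluster_dict label1 label2)

-- ===== LEMMAS AND PROOFS =====

def pvDec (l : List Char) (a : Nat) : Nat := l.foldl (fun a c => a * 10 + (c.toNat - 48)) a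

theorem pvToDigitsCore_append (f : Nat) : ∀ (n : Nat) (l : List Char),
    Nat.toDigitsCore 10 f n l = Nat.toDigitsCore 10 f n [] ++ l := by
  induction f with
  | zero => intro n l; simp [Nat.toDigitsCore]
  | succ f ih =>
    intro n l
    simp only [Nat.toDigitsCore]
    by_cases h : n / 10 = 0
    · simp [h]
    · simp only [h, if_false]
      rw [ih (n / 10) (Nat.digitChar (n % 10) :: l), ih (n / 10) [Nat.digitChar (n % 10)]]
      simp

theorem pvDigitChar_val (m : Nat) (h : m < 10) : (Nat.digitChar m).toNat - 48 = m := by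
  interval_cases m <;> decide

theorem pvDec_toDigitsCore (f : Nat) : ∀ (n a : Nat), 0 < f → n < 10 ^ f →
    pvDec (Nat.toDigitsCore 10 f n []) a
      = a * 10 ^ (Nat.toDigitsCore 10 f n []).length + n := by
  induction f with
  | zero => intro n a h; omega
  | succ f ih =>
    intro n a _ hlt
    simp only [Nat.toDigitsCore]
    by_cases h : n / 10 = 0
    · have hn : n < 10 := by omega
      simp [h, pvDec, pvDigitChar_val (n % 10) (by omega)]
      omega
    · simp only [h, if_false]
      rw [pvToDigitsCore_append]
      have hf : 0 < f := by
        by_contra hf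
        have : f = 0 := by omega
        subst this; simp at hlt; omega
      have hlt' : n / 10 < 10 ^ f := by
        rw [Nat.div_lt_iff_lt_mul (by norm_num : 0 < 10)]
        calc n < 10 ^ (f+1) := hlt
        _ = 10 ^ f * 10 := by ring
      have key := ih (n / 10) a hf hlt'
      simp only [pvDec] at *
      rw [List.foldl_append]
      simp only [List.foldl_cons, List.foldl_nil, List.length_append]
      rw [key, pvDigitChar_val (n % 10) (by omega)]
      simp [pow_succ]
      ring_nf
      omega

theorem pvDec_toDigits (n : Nat) : pvDec (Nat.toDigits 10 n) 0 = n := by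
  have h1 : n < 10 ^ (n + 1) := by
    calc n < n + 1 := by omega
    _ ≤ 10 ^ (n+1) := (Nat.lt_pow_self (by norm_num)).le
  have := pvDec_toDigitsCore (n + 1) n 0 (by omega) h1
  simpa [Nat.toDigits] using this

theorem pvToStr_inj {i j : Int} (hi : 0 ≤ i) (hj : 0 ≤ j)
    (h : PySem.Int.toStr i = PySem.Int.toStr j) : i = j := by
  have h2 : PySem.Int.toChars i = PySem.Int.toChars j := by
    have := congrArg String.toList h
    simpa [PySem.Int.toList_toStr] using this
  simp only [PySem.Int.toChars, if_neg (by omega : ¬ i < 0), if_neg (by omega : ¬ j < 0)] at h2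
  have := congrArg (fun l => pvDec l 0) h2
  simp only [pvDec_toDigits] at this
  omega

theorem pvNodup_map_toStr (n : Int) :
    ((PySem.List.pyRange 0 n 1).map PySem.Int.toStr).Nodup := by
  apply List.Nodup.map_on _ (PySem.List.nodup_pyRange_one 0 n)
  intro x hx y hy h
  exact pvToStr_inj (PySem.List.mem_pyRange_one.1 hx).1 (PySem.List.mem_pyRange_one.1 hy).1 h

theorem pvCountP_nodup {l : List String} (hn : l.Nodup) (v : String) :
    l.countP (fun x => v == x) = if v ∈ l then 1 else 0 := by
  induction l with
  | nil => simp
  | cons x xs ih =>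
    simp only [List.countP_cons, List.nodup_cons] at *
    by_cases h : v = x
    · subst h
      have h0 : List.countP (fun x => v == x) xs = 0 := by
        apply List.countP_eq_zero.2
        intro y hy
        simp
        rintro rfl
        exact hn.1 hy
      simp [h0]
    · simp [h, ih hn.2]

theorem pvSums_getD (valid : PySem.Set String) :
    ∀ (ps : List (String × String)) (d : PySem.Dict String Int) (a : String),
    (ps.foldl (fun d p => if valid.contains p.2 then d.insert p.1 (d.getD p.1 0 + 1) else d) d).getD a 0
      = d.getD a 0 + (ps.countP (fun p => a == p.1 && valid.contains p.2) : Int) := by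
  intro ps
  induction ps with
  | nil => simp
  | cons p rest ih =>
    intro d a
    simp only [List.foldl_cons, List.countP_cons]
    by_cases hc : valid.contains p.2
    · rw [if_pos hc, ih, PySem.Dict.getD_insert]
      have hmem : p.2 ∈ valid := (PySem.Set.contains_iff valid p.2).1 hc
      by_cases ha : a = p.1
      · simp [ha, hmem]
        ring
      · have hb : (a == p.1) = false := by simp [ha]
        simp [ha, hb, hmem]
    · have hcf : valid.contains p.2 = false := by simpa using hc
      have hm : p.2 ∉ valid := fun hmem => hc ((PySem.Set.contains_iff valid p.2).2 hmem)
      rw [if_neg hc, ih]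
      simp [hm]

theorem pvSumIndicator (p : String × String) (i n : Int) :
    ((PySem.List.pyRange 0 n 1).map
      (fun j => (if p == (PySem.Int.toStr i, PySem.Int.toStr j) then (1:Int) else 0))).sum
    = if (PySem.Int.toStr i == p.1 &&
        (PySem.Set.ofList ((PySem.List.pyRange 0 n 1).map PySem.Int.toStr)).contains p.2)
      then 1 else 0 := by
  rcases p with ⟨p1, p2⟩
  by_cases h1 : p1 = PySem.Int.toStr i
  · have hterm : ∀ j : Int, (((p1, p2) : String × String) == (PySem.Int.toStr i, PySem.Int.toStr j))
        = (p2 == PySem.Int.toStr j) := by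
      intro j
      by_cases h : p2 = PySem.Int.toStr j <;> simp [h, h1]
    simp only [hterm]
    rw [PySem.List.sum_map_ite_one_zero (fun j => p2 == PySem.Int.toStr j)]
    rw [show (fun j : Int => p2 == PySem.Int.toStr j) = ((fun x => p2 == x) ∘ PySem.Int.toStr) from rfl,
        ← List.countP_map]
    rw [pvCountP_nodup (pvNodup_map_toStr n) p2]
    have hb : (PySem.Int.toStr i == p1) = true := by simp [h1]
    have hcont : (PySem.Set.ofList ((PySem.List.pyRange 0 n 1).map PySem.Int.toStr)).contains p2
        = decide (p2 ∈ (PySem.List.pyRange 0 n 1).map PySem.Int.toStr) := by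
      rw [PySem.Set.contains_eq_decide]
      simp [PySem.Set.mem_ofList]
    simp only [hb, hcont, Bool.true_and]
    by_cases hm : p2 ∈ (PySem.List.pyRange 0 n 1).map PySem.Int.toStr <;> simp [hm]
  · have hterm : ∀ j : Int, (((p1, p2) : String × String) == (PySem.Int.toStr i, PySem.Int.toStr j))
        = false := by
      intro j
      simp
      intro h
      exact absurd h h1
    simp only [hterm, Bool.false_eq_true, if_false]
    rw [List.sum_eq_zero (by intro x hx; simp at hx; obtain ⟨_, _, rfl⟩ := hx; rfl)]
    have hb : (PySem.Int.toStr i == p1) = false := by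
      simp
      exact fun h => h1 h.symm
    simp [hb]

theorem pvInner_eq (merged : List (String × String)) (i n : Int) :
    ((PySem.List.pyRange 0 n 1).foldl
      (fun acc j =>
        if (PySem.Int.toStr i, PySem.Int.toStr j) ∈ merged then
          acc + (merged.count (PySem.Int.toStr i, PySem.Int.toStr j) : Int)
        else acc) 0)
      = (merged.countP (fun p => PySem.Int.toStr i == p.1 &&
          (PySem.Set.ofList ((PySem.List.pyRange 0 n 1).map PySem.Int.toStr)).contains p.2) : Int) := by
  rw [PySem.List.foldl_congr_mem (PySem.List.pyRange 0 n 1) _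
      (fun acc j => acc + (merged.count (PySem.Int.toStr i, PySem.Int.toStr j) : Int)) 0
      (by
        intro acc j hj
        by_cases hm : (PySem.Int.toStr i, PySem.Int.toStr j) ∈ merged
        · simp [hm]
        · simp [hm, List.count_eq_zero_of_not_mem hm])]
  rw [PySem.List.foldl_add]
  rw [zero_add]
  induction merged with
  | nil => simp
  | cons p rest ih =>
    have hcnt : ∀ j : Int, (((p :: rest).count (PySem.Int.toStr i, PySem.Int.toStr j)) : Int)
        = (rest.count (PySem.Int.toStr i, PySem.Int.toStr j) : Int)
          + (if p == (PySem.Int.toStr i, PySem.Int.toStr j) then (1:Int) else 0) := by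
      intro j
      rw [List.count_cons]
      push_cast
      ring
    simp only [hcnt]
    rw [PySem.List.sum_map_add_int, ih, pvSumIndicator p i n, List.countP_cons]
    push_cast
    ring

theorem pvPorts_eq (label1 label2 : List String) :
    get_cluster_dict label1 label2 = get_cluster_dict_alt label1 label2 := by
  simp only [get_cluster_dict, get_cluster_dict_alt]
  congr 1
  apply PySem.List.foldl_congr_mem
  intro d i hmem
  congr 1
  rw [pvInner_eq, pvSums_getD]
  simp

-- ===== VERDICT (by name: the statement is the Claim_ definition above) =====
theorem get_cluster_dict_spec : Claim_equal_get_cluster_dict := by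
  intro label1 label2 _
  exact pvPorts_eq label1 label2
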